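-- pv_equiv track=rewrite | github.com/June2124/JetLinksAI_Video_Inspection | src/workers/worker_b_vlm.py | filter_events_by_level_list
-- ===== SOURCE A (Python) =====
-- from typing import List, Dict, Any, Optional, Tuple
--
-- _LEVEL_ORDER = {"NO_RISK":0, "LOW": 1, "MEDIUM": 2, "HIGH": 3, "CRITICAL": 4 }
--
-- def filter_events_by_level_list(events: list[dict], min_level: Optional[str]) -> tuple[list[dict], Optional[str]]:
--     if not min_level or min_level not in _LEVEL_ORDER:
--         return events, None
--     keep: list[dict] = []
--     max_lv = None
--     max_val = -1
--     th = _LEVEL_ORDER[min_level]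
--     for it in events:
--         lv = str(it.get("level", "")).upper()
--         v = _LEVEL_ORDER.get(lv, -1)
--         if v >= th:
--             keep.append(it)
--             if v > max_val:
--                 max_val, max_lv = v, lv
--     return keep, max_lv
-- ===== SOURCE B (Python) =====
-- from typing import Optional
--
-- _LEVEL_ORDER = {"NO_RISK": 0, "LOW": 1, "MEDIUM": 2, "HIGH": 3, "CRITICAL": 4}
--
--
-- def _rank(it: dict) -> int:
--     return _LEVEL_ORDER.get(str(it.get("level", "")).upper(), -1)
--
--
-- def filter_events_by_level_list(events: list, min_level: Optional[str]):
--     if not min_level or min_level not in _LEVEL_ORDER: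
--         return events, None
--     th = _LEVEL_ORDER[min_level]
--     keep = [it for it in events if _rank(it) >= th]
--     if not keep:
--         return keep, None
--     best = max(keep, key=_rank)
--     return keep, str(best.get("level", "")).upper()
-- ===== Notes on version B (the rewrite author's own statement) =====
-- stated objective: simpler
-- what changed: Replaces the single incremental pass that interleaves appending with a running (max_val, max_lv) accumulator by a filter comprehension followed by a separate max(key=rank) reduction over the kept list.
import Mathlib
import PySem

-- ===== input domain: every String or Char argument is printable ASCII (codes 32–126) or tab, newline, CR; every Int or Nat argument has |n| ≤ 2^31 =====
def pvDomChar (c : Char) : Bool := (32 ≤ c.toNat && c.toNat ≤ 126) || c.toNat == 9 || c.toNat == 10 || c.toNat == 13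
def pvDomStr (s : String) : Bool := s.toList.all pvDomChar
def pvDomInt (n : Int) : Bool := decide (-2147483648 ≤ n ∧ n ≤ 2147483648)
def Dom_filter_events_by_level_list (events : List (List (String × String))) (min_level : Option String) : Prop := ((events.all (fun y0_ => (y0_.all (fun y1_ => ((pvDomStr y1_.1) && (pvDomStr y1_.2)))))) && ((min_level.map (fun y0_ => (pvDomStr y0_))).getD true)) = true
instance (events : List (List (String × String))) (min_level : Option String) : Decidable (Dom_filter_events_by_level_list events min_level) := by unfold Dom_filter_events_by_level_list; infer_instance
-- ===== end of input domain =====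

-- B replaces A's single interleaved pass (append + running max accumulator) by a
-- filter comprehension followed by a separate max-by-rank reduction; objective: simpler.


-- shared primitive context: _LEVEL_ORDER and the dict lookups both Pythons perform
def pvLevelOrder : List (String × Int) :=
  [("NO_RISK", 0), ("LOW", 1), ("MEDIUM", 2), ("HIGH", 3), ("CRITICAL", 4)]

-- str(it.get("level", "")).upper()  (values are strings, str() is the identity)
def pvLv (it : List (String × String)) : String :=
  PySem.Str.upper ((it.lookup "level").getD "")

-- _LEVEL_ORDER.get(lv, -1)
def pvRank (it : List (String × String)) : Int :=
  (pvLevelOrder.lookup (pvLv it)).getD (-1)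

-- ===== PORT A =====
def filter_events_by_level_list (events : List (List (String × String))) (min_level : Option String) : (List (List (String × String))) × Option String :=
  match min_level with
  | none => (events, none)   -- 'not min_level' (None)
  | some ml =>
    if ml = "" ∨ pvLevelOrder.lookup ml = none then (events, none)   -- '' is falsy / 'not in _LEVEL_ORDER'
    else
      let r := events.foldl
        (fun (acc : List (List (String × String)) × Option String × Int) it =>
          if (pvLevelOrder.lookup (pvLv it)).getD (-1) ≥ (pvLevelOrder.lookup ml).getD 0 then
            if (pvLevelOrder.lookup (pvLv it)).getD (-1) > acc.2.2 then
              (acc.1 ++ [it], some (pvLv it), (pvLevelOrder.lookup (pvLv it)).getD (-1))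
            else (acc.1 ++ [it], acc.2.1, acc.2.2)
          else acc)
        ([], none, -1)
      (r.1, r.2.1)

-- ===== PORT B =====
def filter_events_by_level_list_alt (events : List (List (String × String))) (min_level : Option String) : (List (List (String × String))) × Option String :=
  match min_level with
  | none => (events, none)
  | some ml =>
    if ml = "" ∨ pvLevelOrder.lookup ml = none then (events, none)
    else
      let keep := events.filter (fun it => pvRank it ≥ (pvLevelOrder.lookup ml).getD 0)
      if keep.isEmpty then (keep, none)
      else
        match PySem.List.max? keep pvRank with
        | none => (keep, none)   -- unreachable: keep ≠ []
        | some best => (keep, some (pvLv best))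

-- ===== PRECONDITION & SPEC =====
def Spec_filter_events_by_level_list (events : List (List (String × String))) (min_level : Option String) (out : (List (List (String × String))) × Option String) : Prop := out = filter_events_by_level_list_alt events min_level
instance (events : List (List (String × String))) (min_level : Option String) (out : (List (List (String × String))) × Option String) : Decidable (Spec_filter_events_by_level_list events min_level out) := by unfold Spec_filter_events_by_level_list; infer_instance

-- ===== CLAIM (what is proved, stated in full; the proofs are below) =====
def Claim_equal_filter_events_by_level_list : Prop := ∀ (events : List (List (String × String))) (min_level : Option String), Dom_filter_events_by_level_list events min_level → Spec_filter_events_by_level_list events min_level (filter_events_by_level_list events min_level)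

-- ===== LEMMAS AND PROOFS =====

-- the step of PySem.List.max? (first-wins running maximum)
def pvMaxStep (o : Option (List (String × String))) (x : List (String × String)) : Option (List (String × String)) :=
  match o with
  | none => some x
  | some m => if pvRank m < pvRank x then some x else some m

def pvG (o : Option (List (String × String))) : Option String × Int :=
  match o with
  | none => (none, -1)
  | some m => (some (pvLv m), pvRank m)

theorem pvLevelOrder_lookup_nonneg (ml : String) (t : Int)
    (h : pvLevelOrder.lookup ml = some t) : 0 ≤ t := by
  simp only [pvLevelOrder, List.lookup] at h
  repeat' split at h
  all_goals simp_all
  all_goals omega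

theorem pvMain (th : Int) (hth : 0 ≤ th) (l : List (List (String × String)))
    (acc : List (List (String × String))) (o : Option (List (String × String)))
    (ho : ∀ m, o = some m → th ≤ pvRank m) :
    l.foldl
      (fun (acc : List (List (String × String)) × Option String × Int) it =>
        if (pvLevelOrder.lookup (pvLv it)).getD (-1) ≥ th then
          if (pvLevelOrder.lookup (pvLv it)).getD (-1) > acc.2.2 then
            (acc.1 ++ [it], some (pvLv it), (pvLevelOrder.lookup (pvLv it)).getD (-1))
          else (acc.1 ++ [it], acc.2.1, acc.2.2)
        else acc)
      (acc, pvG o)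
    = (acc ++ l.filter (fun it => pvRank it ≥ th),
       pvG ((l.filter (fun it => pvRank it ≥ th)).foldl pvMaxStep o)) := by
  induction l generalizing acc o with
  | nil => simp
  | cons it l ih =>
    simp only [List.foldl_cons, List.filter_cons]
    have hv : (pvLevelOrder.lookup (pvLv it)).getD (-1) = pvRank it := rfl
    by_cases hp : pvRank it ≥ th
    · cases o with
      | none =>
        simp only [pvG]
        rw [hv, if_pos hp, if_pos (show pvRank it > (-1 : Int) by omega)]
        have := ih (acc ++ [it]) (some it) (fun m hm => by cases hm; exact hp)
        simp only [pvG] at this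
        rw [this]
        simp [hp, pvMaxStep]
      | some m =>
        have hm := ho m rfl
        simp only [pvG]
        by_cases hgt : pvRank m < pvRank it
        · rw [hv, if_pos hp, if_pos (show pvRank it > pvRank m from hgt)]
          have := ih (acc ++ [it]) (some it) (fun m' hm' => by cases hm'; exact hp)
          simp only [pvG] at this
          rw [this]
          simp [hp, pvMaxStep, hgt]
        · rw [hv, if_pos hp, if_neg (show ¬ pvRank it > pvRank m from hgt)]
          have := ih (acc ++ [it]) (some m) (fun m' hm' => by cases hm'; exact hm)
          simp only [pvG] at this
          rw [this]
          simp [hp, pvMaxStep, hgt]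
    · rw [hv, if_neg hp]
      simp [hp, ih acc o ho]

theorem pvMaxEq (keep : List (List (String × String))) :
    PySem.List.max? keep pvRank = keep.foldl pvMaxStep none := by
  unfold PySem.List.max?
  congr 1
  funext o x
  cases o <;> rfl

-- ===== VERDICT (by name: the statement is the Claim_ definition above) =====
theorem filter_events_by_level_list_spec : Claim_equal_filter_events_by_level_list := by
  intro events min_level _
  unfold Spec_filter_events_by_level_list
  cases min_level with
  | none => rfl
  | some ml =>
    simp only [filter_events_by_level_list, filter_events_by_level_list_alt]
    by_cases hml : ml = "" ∨ pvLevelOrder.lookup ml = none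
    · rw [if_pos hml, if_pos hml]
    · rw [if_neg hml, if_neg hml]
      rw [not_or] at hml
      obtain ⟨hne, hlk⟩ := hml
      obtain ⟨t, ht⟩ := Option.ne_none_iff_exists'.mp hlk
      have hth : 0 ≤ (pvLevelOrder.lookup ml).getD 0 := by
        rw [ht]; exact pvLevelOrder_lookup_nonneg ml t ht
      have hmain := pvMain ((pvLevelOrder.lookup ml).getD 0) hth events [] none (by intro m hm; cases hm)
      simp only [pvG] at hmain
      simp only [hmain]
      rw [← pvMaxEq]
      cases hfe : (events.filter (fun it => pvRank it ≥ (pvLevelOrder.lookup ml).getD 0)) with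
      | nil => simp [PySem.List.max?]
      | cons a tl =>
        cases hmx : PySem.List.max? (a :: tl) pvRank with
        | none => simp [PySem.List.max?_eq_none_iff] at hmx
        | some best => simp
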